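-- pv_equiv track=rewrite | github.com/yangahh/daliy-algorithm | week04/answer01.py | solution
-- ===== SOURCE A (Python) =====
-- def solution(N):
--     bin_n = bin(N)[2:]
--     dp = [0] * len(bin_n)
--     max_cnt = 0
--     for i in range(1, len(bin_n)):
--         if bin_n[i] == '1':
--             dp[i] = 0
--             if dp[i-1] > max_cnt:
--                 max_cnt = dp[i-1]
--         else:
--             dp[i] = dp[i-1] + 1
--
--     return max_cnt
-- ===== SOURCE B (Python) =====
-- def _gap(n, run, best):
--     # scan bits from least to most significant
--     if n <= 0:
--         return best
--     if n % 2: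
--         return _gap(n // 2, 0, max(best, run))
--     return _gap(n // 2, run + 1, best)
--
--
-- def solution(N):
--     n = abs(N)
--     while n > 0 and n % 2 == 0:   # trailing zeros precede no one: drop them
--         n //= 2
--     return _gap(n, 0, 0)
-- ===== Notes on version B (the rewrite author's own statement) =====
-- stated objective: alternative
-- what changed: A builds the binary string of N and scans it left-to-right with a dp array of per-index zero-run lengths; B never builds a string or array: it strips trailing zero bits from the absolute value arithmetically, then tail-recurses by halving, tracking the current zero-run and best gap from the least-significant bit upward.
import Mathlib
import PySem

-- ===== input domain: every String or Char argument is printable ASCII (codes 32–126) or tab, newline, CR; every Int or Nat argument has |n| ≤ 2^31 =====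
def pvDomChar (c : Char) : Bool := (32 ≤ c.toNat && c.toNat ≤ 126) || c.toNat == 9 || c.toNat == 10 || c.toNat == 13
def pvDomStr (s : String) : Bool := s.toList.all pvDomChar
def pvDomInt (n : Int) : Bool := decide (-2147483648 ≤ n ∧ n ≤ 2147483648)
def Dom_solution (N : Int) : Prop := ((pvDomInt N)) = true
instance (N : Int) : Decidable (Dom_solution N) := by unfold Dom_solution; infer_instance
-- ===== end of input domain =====

-- B replaces A's per-character dp-array scan over the string bin(N)[2:] by a purely
-- arithmetic right-to-left scan of |N| (strip trailing zeros, then tail-recurse on n // 2):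
-- an alternative decomposition, no string and no dp array.

-- ===== PORT A =====
def solution (N : Int) : Int :=
  let bin_n : List Char := PySem.List.slice (PySem.Int.toBinChars0b N) (some 2) none  -- bin(N)[2:]
  let r := (PySem.List.pyRange 1 (PySem.List.len bin_n) 1).foldl
    (fun (st : List Int × Int) (i : Int) =>
      -- bin_n[i]: i ∈ range(1, len(bin_n)) is always in range, so .getD totalizes exactly
      if (PySem.List.pyGet? bin_n i).getD ' ' == '1' then
        let dp1 := st.1.set i.toNat 0                       -- dp[i] = 0 (i in range: exact)
        if (PySem.List.pyGet? dp1 (i - 1)).getD 0 > st.2 then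
          (dp1, (PySem.List.pyGet? dp1 (i - 1)).getD 0)     -- max_cnt = dp[i-1]
        else (dp1, st.2)
      else
        (st.1.set i.toNat ((PySem.List.pyGet? st.1 (i - 1)).getD 0 + 1), st.2))  -- dp[i] = dp[i-1] + 1
    (List.replicate bin_n.length 0, 0)
  r.2

-- ===== PORT B =====
-- _gap(n, run, best): scan bits from least to most significant
def pvGap (n run best : Int) : Int :=
  if n ≤ 0 then best
  else if PySem.Int.mod n 2 ≠ 0 then pvGap (PySem.Int.floordiv n 2) 0 (max best run)
  else pvGap (PySem.Int.floordiv n 2) (run + 1) best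
termination_by n.toNat
decreasing_by
  all_goals
    simp only [PySem.Int.floordiv, Int.fdiv_eq_ediv] at *
    omega

def pvStrip (n : Int) : Int :=
  if 0 < n ∧ PySem.Int.mod n 2 = 0 then pvStrip (PySem.Int.floordiv n 2) else n
termination_by n.toNat
decreasing_by
  simp only [PySem.Int.floordiv, Int.fdiv_eq_ediv] at *
  omega

def solution_alt (N : Int) : Int :=
  pvGap (pvStrip |N|) 0 0

-- ===== PRECONDITION & SPEC =====
def Spec_solution (N : Int) (out : Int) : Prop := out = solution_alt N
instance (N : Int) (out : Int) : Decidable (Spec_solution N out) := by unfold Spec_solution; infer_instance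

-- ===== CLAIM (what is proved, stated in full; the proofs are below) =====
def Claim_equal_solution : Prop := ∀ (N : Int), Dom_solution N → Spec_solution N (solution N)

-- ===== LEMMAS AND PROOFS =====

theorem pv_tdc_acc (f : Nat) : ∀ (n : Nat) (ds : List Char),
    Nat.toDigitsCore 2 f n ds = Nat.toDigitsCore 2 f n [] ++ ds := by
  induction f with
  | zero => intro n ds; simp [Nat.toDigitsCore]
  | succ f ih =>
    intro n ds
    simp only [Nat.toDigitsCore]
    by_cases h : n / 2 = 0
    · simp [h]
    · simp only [h, if_false]
      rw [ih (n/2) (Nat.digitChar (n % 2) :: ds), ih (n/2) [Nat.digitChar (n % 2)]]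
      simp
theorem pv_tdc_fuel (f : Nat) : ∀ (g n : Nat), n < f → n < g →
    Nat.toDigitsCore 2 f n [] = Nat.toDigitsCore 2 g n [] := by
  induction f with
  | zero => omega
  | succ f ih =>
    intro g n hf hg
    cases g with
    | zero => omega
    | succ g =>
      simp only [Nat.toDigitsCore]
      by_cases h : n / 2 = 0
      · simp [h]
      · simp only [h, if_false]
        rw [pv_tdc_acc, pv_tdc_acc g, ih g (n/2) (by omega) (by omega)]
theorem pv_tdc_step (f n : Nat) (ds : List Char) :
    Nat.toDigitsCore 2 (f+1) n ds =
      if n / 2 = 0 then Nat.digitChar (n % 2) :: ds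
      else Nat.toDigitsCore 2 f (n / 2) (Nat.digitChar (n % 2) :: ds) := by
  simp [Nat.toDigitsCore]
theorem pv_toDigits_rec' (m : Nat) (hm : 2 ≤ m) :
    Nat.toDigits 2 m = Nat.toDigits 2 (m / 2) ++ [Nat.digitChar (m % 2)] := by
  unfold Nat.toDigits
  rw [pv_tdc_step]
  have h : ¬ (m / 2 = 0) := by omega
  simp only [h, if_false]
  rw [pv_tdc_acc, pv_tdc_fuel m (m/2+1) (m/2) (by omega) (by omega)]
theorem pv_toDigits_head (m : Nat) (hm : 1 ≤ m) :
    Nat.toDigits 2 m = '1' :: (Nat.toDigits 2 m).tail := by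
  induction m using Nat.strong_induction_on with
  | _ m ih =>
    by_cases h2 : m < 2
    · have h1 : m = 1 := by omega
      subst h1; decide
    · rw [pv_toDigits_rec' m (by omega)]
      rw [ih (m/2) (by omega) (by omega)]
      simp
def pvTz (m : Nat) : Nat :=
  if m = 0 then 0 else if m % 2 = 1 then 0 else pvTz (m / 2) + 1
def pvG (m : Nat) : Int :=
  if m ≤ 1 then 0
  else if m % 2 = 1 then max (pvG (m / 2)) ((pvTz (m / 2) : Int)) else pvG (m / 2)
def pvStep (p : Int × Int) (c : Char) : Int × Int :=
  if c == '1' then (0, max p.2 p.1) else (p.1 + 1, p.2)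

theorem pvTz_odd (m : Nat) (h : m % 2 = 1) : pvTz m = 0 := by
  rw [pvTz]; simp [h]
theorem pvTz_even (m : Nat) (h0 : m ≠ 0) (h : m % 2 = 0) : pvTz m = pvTz (m / 2) + 1 := by
  rw [pvTz]; simp [h0, h]
theorem pvG_even (m : Nat) (h2 : 2 ≤ m) (h : m % 2 = 0) : pvG m = pvG (m / 2) := by
  rw [pvG]; have : ¬ m ≤ 1 := by omega
  simp [this, h]
theorem pvG_odd (m : Nat) (h2 : 2 ≤ m) (h : m % 2 = 1) : pvG m = max (pvG (m / 2)) ((pvTz (m / 2) : Int)) := by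
  rw [pvG]; have : ¬ m ≤ 1 := by omega
  simp [this, h]

theorem pv_charfold_digits (m : Nat) (hm : 1 ≤ m) :
    ((Nat.toDigits 2 m).tail).foldl pvStep ((0 : Int), (0 : Int)) = ((pvTz m : Int), pvG m) := by
  induction m using Nat.strong_induction_on with
  | _ m ih =>
    by_cases h2 : m < 2
    · have h1 : m = 1 := by omega
      subst h1
      have hd : Nat.toDigits 2 1 = ['1'] := by decide
      rw [hd, pvTz, pvG]
      norm_num
    · rw [pv_toDigits_rec' m (by omega)]
      have hne : Nat.toDigits 2 (m / 2) ≠ [] := by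
        rw [pv_toDigits_head (m/2) (by omega)]; simp
      rw [List.tail_append_of_ne_nil hne, List.foldl_append]
      rw [ih (m/2) (by omega) (by omega)]
      have hb : m % 2 = 0 ∨ m % 2 = 1 := by omega
      have h1 : ¬ m ≤ 1 := by omega
      have h0 : ¬ m = 0 := by omega
      rcases hb with hb | hb
      · have hd : Nat.digitChar 0 = '0' := by decide
        rw [hb, hd]
        simp only [List.foldl_cons, List.foldl_nil, pvStep]
        rw [if_neg (by decide), pvTz_even m h0 hb, pvG_even m (by omega) hb]
        push_cast
        ring_nf
      · have hd : Nat.digitChar 1 = '1' := by decide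
        rw [hb, hd]
        simp only [List.foldl_cons, List.foldl_nil, pvStep]
        rw [if_pos (by decide), pvTz_odd m hb, pvG_odd m (by omega) hb]
        norm_num
theorem pv_mod_cast (m : Nat) : PySem.Int.mod (m : Int) 2 = ((m % 2 : Nat) : Int) := by
  simp only [PySem.Int.mod, Int.fmod_eq_emod]; omega
theorem pv_fdiv_cast (m : Nat) : PySem.Int.floordiv (m : Int) 2 = ((m / 2 : Nat) : Int) := by
  simp only [PySem.Int.floordiv, Int.fdiv_eq_ediv]; omega

theorem pvG_nonneg (m : Nat) : 0 ≤ pvG m := by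
  induction m using Nat.strong_induction_on with
  | _ m ih =>
    rw [pvG]
    split_ifs with h1 h2
    · norm_num
    · exact le_max_of_le_right (by positivity)
    · exact ih (m/2) (by omega)

theorem pv_gap_spec (m : Nat) : ∀ (run best : Int), 0 ≤ run →
    pvGap (m : Int) run best =
      if m = 0 then best else max best (max (pvG m) (run + (pvTz m : Int))) := by
  induction m using Nat.strong_induction_on with
  | _ m ih =>
    intro run best hrun
    rw [pvGap]
    by_cases h0 : m = 0
    · subst h0; norm_num
    · rw [if_neg (by omega), pv_mod_cast, pv_fdiv_cast]
      simp only [h0, if_false]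
      by_cases hb : m % 2 = 1
      · rw [if_pos (by omega)]
        rw [ih (m/2) (by omega) 0 (max best run) le_rfl]
        by_cases h1 : m = 1
        · subst h1
          have ht : pvTz 1 = 0 := pvTz_odd 1 (by norm_num)
          have hg : pvG 1 = 0 := by rw [pvG]; norm_num
          simp [ht, hg]
          omega
        · have h2 : 2 ≤ m := by omega
          rw [if_neg (by omega), pvTz_odd m hb, pvG_odd m h2 hb]
          have := pvG_nonneg (m/2)
          have : (0:Int) ≤ (pvTz (m/2) : Int) := by positivity
          omega
      · rw [if_neg (by omega)]
        have h2 : 2 ≤ m := by omega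
        rw [ih (m/2) (by omega) (run+1) best (by omega)]
        rw [if_neg (by omega), pvTz_even m h0 (by omega), pvG_even m h2 (by omega)]
        push_cast
        omega

theorem pv_strip_spec (m : Nat) (hm : 0 < m) :
    ∃ m' : Nat, pvStrip (m : Int) = (m' : Int) ∧ 0 < m' ∧ m' % 2 = 1 ∧ pvG m' = pvG m := by
  induction m using Nat.strong_induction_on with
  | _ m ih =>
    rw [pvStrip, pv_mod_cast]
    by_cases hb : m % 2 = 0
    · rw [if_pos ⟨by omega, by omega⟩, pv_fdiv_cast]
      obtain ⟨m', h1, h2, h3, h4⟩ := ih (m/2) (by omega) (by omega)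
      exact ⟨m', h1, h2, h3, by rw [h4, ← pvG_even m (by omega) hb]⟩
    · rw [if_neg (by omega)]
      exact ⟨m, rfl, hm, by omega, rfl⟩

theorem pv_alt_val (m : Nat) (hm : 0 < m) : pvGap (pvStrip (m : Int)) 0 0 = pvG m := by
  obtain ⟨m', h1, h2, h3, h4⟩ := pv_strip_spec m hm
  rw [h1, pv_gap_spec m' 0 0 le_rfl, if_neg (by omega), pvTz_odd m' h3]
  have := pvG_nonneg m'
  omega
theorem pv_fold_eq (cs : List Char) (j : Nat) : ∀ (k : Nat) (dp : List Int) (best prev : Int),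
    cs.length - k = j → dp.length = cs.length → 1 ≤ k → k ≤ cs.length →
    dp[k - 1]? = some prev →
    ((PySem.List.pyRange (k : Int) (PySem.List.len cs) 1).foldl
      (fun (st : List Int × Int) (i : Int) =>
        if (PySem.List.pyGet? cs i).getD ' ' == '1' then
          let dp1 := st.1.set i.toNat 0
          if (PySem.List.pyGet? dp1 (i - 1)).getD 0 > st.2 then
            (dp1, (PySem.List.pyGet? dp1 (i - 1)).getD 0)
          else (dp1, st.2)
        else
          (st.1.set i.toNat ((PySem.List.pyGet? st.1 (i - 1)).getD 0 + 1), st.2))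
      (dp, best)).2
    = ((cs.drop k).foldl pvStep (prev, best)).2 := by
  induction j with
  | zero =>
    intro k dp best prev hj hlen hk1 hk2 hprev
    have hk : k = cs.length := by omega
    subst hk
    rw [PySem.List.len_eq]
    rw [show PySem.List.pyRange (cs.length : Int) (cs.length : Int) 1 = [] from by
      simp [PySem.List.pyRange]]
    simp
  | succ j ih =>
    intro k dp best prev hj hlen hk1 hk2 hprev
    have hk : k < cs.length := by omega
    rw [PySem.List.len_eq, PySem.List.pyRange_one_cons (by exact_mod_cast hk)]
    rw [List.foldl_cons]
    have hget : PySem.List.pyGet? cs (k : Int) = some cs[k] :=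
      PySem.List.pyGet?_ofNat cs k hk
    have htn : ((k : Int)).toNat = k := by omega
    have hsub : ((k : Int)) - 1 = ((k - 1 : Nat) : Int) := by omega
    have hread : ∀ v : Int, PySem.List.pyGet? (dp.set k v) ((k : Int) - 1) = some prev := by
      intro v
      rw [hsub, PySem.List.pyGet?_natCast, List.getElem?_set_ne (by omega)]
      exact hprev
    have hdrop : cs.drop k = cs[k] :: cs.drop (k + 1) := List.drop_eq_getElem_cons hk
    rw [hdrop, List.foldl_cons]
    by_cases hc : cs[k] == '1'
    · simp only [hget, Option.getD_some, hc, if_true, htn, hread, pvStep]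
      have h1 : ((k : Int)) + 1 = ((k + 1 : Nat) : Int) := by omega
      rw [show (if prev > best then (dp.set k 0, prev) else (dp.set k 0, best))
            = (dp.set k 0, max best prev) from by split_ifs <;> simp <;> omega]
      rw [h1, ← PySem.List.len_eq]
      rw [ih (k+1) (dp.set k 0) (max best prev) 0 (by omega) (by simp [hlen]) (by omega) (by omega)
        (by rw [show k + 1 - 1 = k from by omega, List.getElem?_set_self (by omega)])]
    · simp only [hget, Option.getD_some, hc, Bool.false_eq_true, if_false, htn, pvStep]
      rw [show PySem.List.pyGet? dp ((k : Int) - 1) = some prev from by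
        rw [hsub, PySem.List.pyGet?_natCast]; exact hprev]
      simp only [Option.getD_some]
      have h1 : ((k : Int)) + 1 = ((k + 1 : Nat) : Int) := by omega
      rw [h1, ← PySem.List.len_eq]
      rw [ih (k+1) (dp.set k (prev + 1)) best (prev + 1) (by omega) (by simp [hlen]) (by omega) (by omega)
        (by rw [show k + 1 - 1 = k from by omega, List.getElem?_set_self (by omega)])]
theorem pv_fold_eq' (cs : List Char) (h1 : 1 ≤ cs.length) :
    ((PySem.List.pyRange 1 (PySem.List.len cs) 1).foldl
      (fun (st : List Int × Int) (i : Int) =>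
        if (PySem.List.pyGet? cs i).getD ' ' == '1' then
          let dp1 := st.1.set i.toNat 0
          if (PySem.List.pyGet? dp1 (i - 1)).getD 0 > st.2 then
            (dp1, (PySem.List.pyGet? dp1 (i - 1)).getD 0)
          else (dp1, st.2)
        else
          (st.1.set i.toNat ((PySem.List.pyGet? st.1 (i - 1)).getD 0 + 1), st.2))
      (List.replicate cs.length 0, 0)).2
    = ((cs.drop 1).foldl pvStep ((0:Int), (0:Int))).2 := by
  have := pv_fold_eq cs (cs.length - 1) 1 (List.replicate cs.length 0) 0 0
    (by omega) (by simp) (by omega) (by omega)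
    (by simp only [List.getElem?_replicate]; rw [if_pos]; omega)
  rw [show ((1:Nat):Int) = (1:Int) from rfl] at this
  exact this

theorem pv_sol_val (N : Int) (hN : N ≠ 0) : solution N = pvG N.natAbs := by
  have hm1 : 1 ≤ N.natAbs := by omega
  have hbin : PySem.List.slice (PySem.Int.toBinChars0b N) (some 2) none =
      (if N < 0 then 'b' :: Nat.toDigits 2 N.natAbs else Nat.toDigits 2 N.natAbs) := by
    rw [PySem.List.slice_from _ (by norm_num)]
    unfold PySem.Int.toBinChars0b
    split_ifs with h
    · rfl
    · have : N.toNat = N.natAbs := by omega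
      simp [this]
  unfold solution
  simp only [hbin]
  split_ifs with h
  · rw [pv_fold_eq' _ (by simp)]
    have hd : ('b' :: Nat.toDigits 2 N.natAbs).drop 1 = Nat.toDigits 2 N.natAbs := rfl
    rw [hd, pv_toDigits_head N.natAbs hm1, List.foldl_cons]
    rw [show pvStep (0, 0) '1' = ((0:Int), (0:Int)) from by simp [pvStep]]
    rw [pv_charfold_digits N.natAbs hm1]
  · rw [pv_fold_eq' _ (by rw [pv_toDigits_head N.natAbs hm1]; simp)]
    rw [List.drop_one, pv_charfold_digits N.natAbs hm1]

-- ===== VERDICT (by name: the statement is the Claim_ definition above) =====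
theorem solution_spec : Claim_equal_solution := by
  intro N _
  unfold Spec_solution
  by_cases h0 : N = 0
  · subst h0
    have hB : solution_alt 0 = 0 := by
      unfold solution_alt
      rw [abs_zero, pvStrip]; norm_num
      rw [pvGap]; norm_num
    rw [hB]; decide
  · have hA := pv_sol_val N h0
    have hm : 0 < N.natAbs := by omega
    have hB : solution_alt N = pvG N.natAbs := by
      have : |N| = (N.natAbs : Int) := Int.abs_eq_natAbs N
      rw [solution_alt, this, pv_alt_val N.natAbs hm]
    rw [hA, hB]
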